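-- pv_equiv track=rewrite | github.com/diogoneiss/Structured-Grammar-Evolution-in-Numba | scripts.py | find_recursive_and_non_recursive_terminals
-- ===== SOURCE A (Python) =====
-- def get_terminals(productions):
--     terminals = set()
--     non_terminals = set(productions.keys())
--
--     for rhs in productions.values():
--         for rule in rhs:
--             for token in rule:
--                 if token not in non_terminals:
--                     terminals.add(token)
--
--     return terminals
--
-- def find_recursive_and_non_recursive_terminals(grammar):
--     recursive_terminals = set()
--     non_recursive_terminals = set()
--     non_terminals = set(grammar.keys())
--     terminals = get_terminals(grammar)
--
--     def is_recursive(nt, visited):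
--         if nt in visited:
--             return True
--         visited.add(nt)
--         for rule in grammar[nt]:
--             for token in rule:
--                 if token in non_terminals and is_recursive(token, visited):
--                     return True
--         visited.remove(nt)
--         return False
--
--     for nt in non_terminals:
--         if is_recursive(nt, set()):
--             recursive_terminals.add(nt)
--         else:
--             non_recursive_terminals.add(nt)
--
--     non_recursive_terminals |= terminals
--
--     return recursive_terminals, non_recursive_terminals
-- ===== SOURCE B (Python) =====
-- def find_recursive_and_non_recursive_terminals(grammar):
--     non_terminals = set(grammar.keys())
--
--     # dependency graph: nt -> the non-terminal tokens of its rules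
--     succ = {}
--     for nt in grammar:
--         succ[nt] = [t for rule in grammar[nt] for t in rule if t in non_terminals]
--
--     # reach_plus(x) = all nodes reachable from x by at least one edge,
--     # computed by iterating one-step expansion |grammar| times (a fixpoint is
--     # reached within that many rounds).
--     def reach_plus(x):
--         r = set(succ[x])
--         for _ in range(len(succ)):
--             nr = r | {t for m in r for t in succ[m]}
--             if len(nr) == len(r):
--                 break
--             r = nr
--         return r
--
--     reach = {nt: reach_plus(nt) for nt in grammar}
--     cyclic = {m for m in grammar if m in reach[m]}
--     recursive = {nt for nt in non_terminals
--                  if any(m == nt or m in reach[nt] for m in cyclic)}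
--     terminals = {t for rhs in grammar.values() for rule in rhs
--                  for t in rule if t not in non_terminals}
--     non_recursive = (non_terminals - recursive) | terminals
--     return recursive, non_recursive
-- ===== Notes on version B (the rewrite author's own statement) =====
-- stated objective: alternative
-- what changed: A decides 'recursive' per non-terminal by a backtracking path-marking DFS that re-explores shared subgraphs; B builds the one-step successor lists once, computes each node's transitive successor set by iterating a one-step expansion to a fixpoint, and classifies nt as recursive iff nt reaches some node that reaches itself.
import Mathlib
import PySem

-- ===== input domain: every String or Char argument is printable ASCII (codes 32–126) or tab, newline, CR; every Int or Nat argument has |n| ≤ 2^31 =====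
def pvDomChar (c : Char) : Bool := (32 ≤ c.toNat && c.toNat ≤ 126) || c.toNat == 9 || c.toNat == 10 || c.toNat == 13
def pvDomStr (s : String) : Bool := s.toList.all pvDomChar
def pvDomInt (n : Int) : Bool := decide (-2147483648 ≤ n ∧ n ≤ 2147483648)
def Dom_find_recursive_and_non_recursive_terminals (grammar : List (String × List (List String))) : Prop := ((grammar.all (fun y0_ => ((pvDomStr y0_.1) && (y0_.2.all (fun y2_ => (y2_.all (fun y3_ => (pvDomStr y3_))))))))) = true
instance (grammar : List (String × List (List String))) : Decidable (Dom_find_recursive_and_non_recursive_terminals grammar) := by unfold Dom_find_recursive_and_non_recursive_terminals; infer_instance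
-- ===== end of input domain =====

-- B replaces A's per-node backtracking DFS by a different algorithm: successor
-- lists are built once, each node's transitive-successor set is computed by
-- iterating a one-step expansion to a fixpoint, and a node is recursive iff it
-- reaches a node that reaches itself.  Both Pythons return a pair of sets
-- (compared as finite sets); both ports build those sets in the same
-- first-insertion order.

-- ===== PORT A =====
-- set(grammar.keys()) — shared by both Pythons line for line
def pvNT (grammar : List (String × List (List String))) : PySem.Set String :=
  PySem.Set.ofList (PySem.Dict.mk grammar).keys

-- get_terminals(productions)
def pvGetTerminals (grammar : List (String × List (List String))) : PySem.Set String :=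
  let nonTerminals := pvNT grammar
  ((PySem.Dict.mk grammar).values).foldl (fun ts rhs =>
    rhs.foldl (fun ts rule =>
      rule.foldl (fun ts token =>
        if PySem.Set.contains nonTerminals token then ts else PySem.Set.add ts token) ts) ts)
    PySem.Set.empty

-- is_recursive(nt, visited).  Python passes `visited` by mutation but removes nt
-- again before returning False, so functional passing is exact.  The recursion
-- depth is bounded by |non_terminals|+1 (each level adds a fresh non-terminal to
-- `visited`), so fuel = |non_terminals|+1 makes the 0-fuel branch unreachable.
def pvIsRec (grammar : List (String × List (List String))) (nonTerminals : PySem.Set String) :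
    Nat → String → PySem.Set String → Bool
  | 0, _, _ => false
  | fuel+1, nt, visited =>
    if PySem.Set.contains visited nt then true
    else
      ((PySem.Dict.mk grammar).getD nt []).any (fun rule =>
        rule.any (fun token =>
          PySem.Set.contains nonTerminals token &&
            pvIsRec grammar nonTerminals fuel token (PySem.Set.add visited nt)))

def find_recursive_and_non_recursive_terminals (grammar : List (String × List (List String))) :
    List String × List String :=
  let nonTerminals := pvNT grammar
  let terminals := pvGetTerminals grammar
  let p := nonTerminals.foldl
    (fun (p : PySem.Set String × PySem.Set String) nt =>
      if pvIsRec grammar nonTerminals (nonTerminals.length + 1) nt PySem.Set.empty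
      then (PySem.Set.add p.1 nt, p.2)
      else (p.1, PySem.Set.add p.2 nt))
    (PySem.Set.empty, PySem.Set.empty)
  (p.1, PySem.Set.update p.2 terminals)

-- ===== PORT B =====
-- [t for rule in rhs for t in rule if t in non_terminals]
def pvNonTermTokens (nonTerminals : PySem.Set String) (rhs : List (List String)) : List String :=
  rhs.flatMap (fun rule => rule.filter (fun t => PySem.Set.contains nonTerminals t))

-- succ = {}; for nt in grammar: succ[nt] = [...]
def pvSuccD (grammar : List (String × List (List String))) : PySem.Dict String (List String) :=
  (PySem.Dict.mk grammar).keys.foldl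
    (fun d nt => d.insert nt (pvNonTermTokens (pvNT grammar) ((PySem.Dict.mk grammar).getD nt [])))
    PySem.Dict.empty

-- r | {t for m in r for t in succ[m]}
def pvStep (succ : PySem.Dict String (List String)) (r : PySem.Set String) : PySem.Set String :=
  PySem.Set.union r (PySem.Set.ofList (r.flatMap (fun m => succ.getD m [])))

-- for _ in range(n): nr = r | {...}; if len(nr) == len(r): break; r = nr
def pvIterBreak (succ : PySem.Dict String (List String)) : Nat → PySem.Set String → PySem.Set String
  | 0, r => r
  | k+1, r =>
    if (pvStep succ r).length == r.length then r
    else pvIterBreak succ k (pvStep succ r)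

-- reach_plus(x)
def pvReachPlus (grammar : List (String × List (List String))) (x : String) : PySem.Set String :=
  pvIterBreak (pvSuccD grammar) (pvSuccD grammar).size (PySem.Set.ofList ((pvSuccD grammar).getD x []))

-- reach = {nt: reach_plus(nt) for nt in grammar}
def pvReachD (grammar : List (String × List (List String))) : PySem.Dict String (PySem.Set String) :=
  (PySem.Dict.mk grammar).keys.foldl
    (fun d nt => d.insert nt (pvReachPlus grammar nt)) PySem.Dict.empty

-- cyclic = {m for m in grammar if m in reach[m]}
def pvCyclic (grammar : List (String × List (List String))) : PySem.Set String :=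
  (PySem.Dict.mk grammar).keys.foldl
    (fun s m => if PySem.Set.contains ((pvReachD grammar).getD m []) m then PySem.Set.add s m else s)
    PySem.Set.empty

-- terminals = {t for rhs in grammar.values() for rule in rhs for t in rule if t not in non_terminals}
def pvTerminalsB (grammar : List (String × List (List String))) : PySem.Set String :=
  ((PySem.Dict.mk grammar).values).foldl (fun ts rhs =>
    rhs.foldl (fun ts rule =>
      rule.foldl (fun ts token =>
        if PySem.Set.contains (pvNT grammar) token then ts else PySem.Set.add ts token) ts) ts)
    PySem.Set.empty

def find_recursive_and_non_recursive_terminals_alt (grammar : List (String × List (List String))) :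
    List String × List String :=
  let nonTerminals := pvNT grammar
  let reach := pvReachD grammar
  let cyclic := pvCyclic grammar
  -- recursive = {nt for nt in non_terminals if any(m == nt or m in reach[nt] for m in cyclic)}
  let recursive := nonTerminals.foldl
    (fun s nt =>
      if cyclic.any (fun m => m == nt || PySem.Set.contains (reach.getD nt []) m)
      then PySem.Set.add s nt else s)
    PySem.Set.empty
  let terminals := pvTerminalsB grammar
  (recursive, PySem.Set.union (PySem.Set.diff nonTerminals recursive) terminals)

-- ===== PRECONDITION & SPEC =====
def Spec_find_recursive_and_non_recursive_terminals (grammar : List (String × List (List String))) (out : List String × List String) : Prop := out = find_recursive_and_non_recursive_terminals_alt grammar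
instance (grammar : List (String × List (List String))) (out : List String × List String) : Decidable (Spec_find_recursive_and_non_recursive_terminals grammar out) := by unfold Spec_find_recursive_and_non_recursive_terminals; infer_instance

-- ===== CLAIM (what is proved, stated in full; the proofs are below) =====
def Claim_equal_find_recursive_and_non_recursive_terminals : Prop := ∀ (grammar : List (String × List (List String))), Dom_find_recursive_and_non_recursive_terminals grammar → Spec_find_recursive_and_non_recursive_terminals grammar (find_recursive_and_non_recursive_terminals grammar)

-- ===== LEMMAS AND PROOFS =====

-- The dependency graph both programs walk: an edge nt → token for every
-- non-terminal token of a rule of nt.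
def pvSuccs (grammar : List (String × List (List String))) (a : String) : List String :=
  pvNonTermTokens (pvNT grammar) ((PySem.Dict.mk grammar).getD a [])

def pvEdge (grammar : List (String × List (List String))) (a b : String) : Prop :=
  b ∈ pvSuccs grammar a

lemma pvEdge_mem_NT {grammar : List (String × List (List String))} {a b : String}
    (h : pvEdge grammar a b) : b ∈ pvNT grammar := by
  simp only [pvEdge, pvSuccs, pvNonTermTokens, List.mem_flatMap, List.mem_filter] at h
  obtain ⟨rule, _, _, hc⟩ := h
  exact (PySem.Set.contains_iff _ _).mp hc

-- generic fold shapes ------------------------------------------------------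

lemma getD_foldl_insert_fun {β : Type} (f : String → β) :
    ∀ (l : List String) (d : PySem.Dict String β) (k : String) (v : β),
      (l.foldl (fun d nt => d.insert nt (f nt)) d).getD k v
        = if k ∈ l then f k else d.getD k v := by
  intro l
  induction l with
  | nil => intro d k v; simp
  | cons x xs ih =>
    intro d k v
    simp only [List.foldl_cons, ih, PySem.Dict.getD_insert, List.mem_cons]
    by_cases hx : k = x <;> by_cases hk : k ∈ xs <;> simp [hx, hk]

lemma mem_foldl_add_if (p : String → Bool) :
    ∀ (l : List String) (s0 : PySem.Set String) (y : String),
      y ∈ l.foldl (fun s x => if p x then PySem.Set.add s x else s) s0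
        ↔ y ∈ s0 ∨ (y ∈ l ∧ p y = true) := by
  intro l
  induction l with
  | nil => intro s0 y; simp
  | cons x xs ih =>
    intro s0 y
    simp only [List.foldl_cons, ih]
    by_cases hx : p x
    · simp only [hx, if_pos, PySem.Set.mem_add, List.mem_cons]
      constructor
      · rintro (⟨h | rfl⟩ | h)
        · exact Or.inl h
        · exact Or.inr ⟨Or.inl rfl, hx⟩
        · exact Or.inr ⟨Or.inr h.1, h.2⟩
      · rintro (h | ⟨rfl | h, hp⟩)
        · exact Or.inl (Or.inl h)
        · exact Or.inl (Or.inr rfl)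
        · exact Or.inr ⟨h, hp⟩
    · simp only [hx, if_neg, List.mem_cons, Bool.not_eq_true]
      constructor
      · rintro (h | h)
        · exact Or.inl h
        · exact Or.inr ⟨Or.inr h.1, h.2⟩
      · rintro (h | ⟨rfl | h, hp⟩)
        · exact Or.inl h
        · exact absurd hp (by simp [hx])
        · exact Or.inr ⟨h, hp⟩

lemma foldl_add_if_eq_filter_aux (p : String → Bool) :
    ∀ (l : List String) (s0 : PySem.Set String), l.Nodup → (∀ x ∈ l, x ∉ s0) →
      l.foldl (fun s x => if p x then PySem.Set.add s x else s) s0 = s0 ++ l.filter p := by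
  intro l
  induction l with
  | nil => intro s0 _ _; simp
  | cons x xs ih =>
    intro s0 hnd hf
    have hx0 : x ∉ s0 := hf x (List.mem_cons_self)
    have hnd' := (List.nodup_cons.mp hnd)
    by_cases hp : p x
    · have : PySem.Set.add s0 x = s0 ++ [x] := PySem.Set.add_of_not_mem hx0
      simp only [List.foldl_cons, hp, if_pos, this]
      rw [ih (s0 ++ [x]) hnd'.2 (by
        intro y hy
        simp only [List.mem_append, List.mem_singleton]
        rintro (h | rfl)
        · exact hf y (List.mem_cons_of_mem _ hy) h
        · exact hnd'.1 hy)]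
      simp [hp]
    · simp only [List.foldl_cons, hp, if_neg, Bool.not_eq_true]
      rw [ih s0 hnd'.2 (fun y hy => hf y (List.mem_cons_of_mem _ hy))]
      simp [hp]

lemma foldl_pair_eq_filter (p : String → Bool) :
    ∀ (l : List String) (a b : PySem.Set String), l.Nodup →
      (∀ x ∈ l, x ∉ a) → (∀ x ∈ l, x ∉ b) →
      l.foldl (fun (s : PySem.Set String × PySem.Set String) nt =>
          if p nt then (PySem.Set.add s.1 nt, s.2) else (s.1, PySem.Set.add s.2 nt)) (a, b)
        = (a ++ l.filter p, b ++ l.filter (fun x => !p x)) := by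
  intro l
  induction l with
  | nil => intro a b _ _ _; simp
  | cons x xs ih =>
    intro a b hnd ha hb
    have hnd' := List.nodup_cons.mp hnd
    by_cases hp : p x
    · have hadd : PySem.Set.add a x = a ++ [x] := PySem.Set.add_of_not_mem (ha x List.mem_cons_self)
      simp only [List.foldl_cons, hp, if_pos, hadd]
      rw [ih (a ++ [x]) b hnd'.2 (by
            intro y hy
            simp only [List.mem_append, List.mem_singleton]
            rintro (h | rfl)
            · exact ha y (List.mem_cons_of_mem _ hy) h
            · exact hnd'.1 hy)
          (fun y hy => hb y (List.mem_cons_of_mem _ hy))]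
      simp [hp]
    · have hadd : PySem.Set.add b x = b ++ [x] := PySem.Set.add_of_not_mem (hb x List.mem_cons_self)
      simp only [List.foldl_cons, hp, if_neg, Bool.not_eq_true, hadd]
      rw [ih a (b ++ [x]) hnd'.2 (fun y hy => ha y (List.mem_cons_of_mem _ hy)) (by
            intro y hy
            simp only [List.mem_append, List.mem_singleton]
            rintro (h | rfl)
            · exact hb y (List.mem_cons_of_mem _ hy) h
            · exact hnd'.1 hy)]
      simp [hp]

-- A-side characterisation ---------------------------------------------------

lemma anyany_iff (grammar : List (String × List (List String))) (nt : String) (r : String → Bool) :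
    (((PySem.Dict.mk grammar).getD nt []).any (fun rule =>
        rule.any (fun token => PySem.Set.contains (pvNT grammar) token && r token)) = true)
      ↔ ∃ t ∈ pvSuccs grammar nt, r t = true := by
  simp only [pvSuccs, pvNonTermTokens, List.any_eq_true, List.mem_flatMap, List.mem_filter,
    Bool.and_eq_true]
  constructor
  · rintro ⟨rule, hr, t, ht, hc, hrt⟩
    exact ⟨t, ⟨rule, hr, ht, hc⟩, hrt⟩
  · rintro ⟨t, ⟨rule, hr, ht, hc⟩, hrt⟩
    exact ⟨rule, hr, t, ht, hc, hrt⟩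

lemma pvIsRec_sound (grammar : List (String × List (List String))) :
    ∀ (fuel : Nat) (nt : String) (visited : PySem.Set String),
      pvIsRec grammar (pvNT grammar) fuel nt visited = true →
      ∃ m, Relation.ReflTransGen (pvEdge grammar) nt m ∧
        (m ∈ visited ∨ Relation.TransGen (pvEdge grammar) m m) := by
  intro fuel
  induction fuel with
  | zero => intro nt visited h; simp [pvIsRec] at h
  | succ f ih =>
    intro nt visited h
    simp only [pvIsRec] at h
    by_cases hv : PySem.Set.contains visited nt = true
    · exact ⟨nt, Relation.ReflTransGen.refl, Or.inl ((PySem.Set.contains_iff _ _).mp hv)⟩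
    · rw [if_neg hv] at h
      rw [anyany_iff] at h
      obtain ⟨t, hts, hrec⟩ := h
      have hedge : pvEdge grammar nt t := hts
      obtain ⟨m, hstar, hm⟩ := ih t (PySem.Set.add visited nt) hrec
      rcases hm with hm | hm
      · rw [PySem.Set.mem_add] at hm
        rcases hm with hm | hm2
        · exact ⟨m, Relation.ReflTransGen.head hedge hstar, Or.inl hm⟩
        · subst hm2
          exact ⟨m, Relation.ReflTransGen.refl,
            Or.inr (Relation.TransGen.head' hedge hstar)⟩
      · exact ⟨m, Relation.ReflTransGen.head hedge hstar, Or.inr hm⟩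

lemma pvIsRec_complete (grammar : List (String × List (List String))) :
    ∀ (fuel : Nat) (visited : PySem.Set String) (nt m : String),
      visited.Nodup → (∀ x ∈ visited, x ∈ pvNT grammar) → nt ∈ pvNT grammar →
      (pvNT grammar).length - visited.length < fuel →
      Relation.ReflTransGen (pvEdge grammar) nt m →
      (m ∈ visited ∨ Relation.TransGen (pvEdge grammar) m m) →
      pvIsRec grammar (pvNT grammar) fuel nt visited = true := by
  intro fuel
  induction fuel with
  | zero => intro _ _ _ _ _ _ hlt _ _; omega
  | succ f ih =>
    intro visited nt m hnd hsub hnt hlt hstar hm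
    simp only [pvIsRec]
    by_cases hv : PySem.Set.contains visited nt = true
    · rw [if_pos hv]
    · rw [if_neg hv]
      have hntv : nt ∉ visited := fun h => hv ((PySem.Set.contains_iff _ _).mpr h)
      have hdisj : List.Disjoint visited [nt] := by
        intro a ha hb
        simp only [List.mem_singleton] at hb
        exact hntv (hb ▸ ha)
      have hnd' : (visited ++ [nt]).Nodup := hnd.append (List.nodup_singleton nt) hdisj
      have hsub' : ∀ x ∈ visited ++ [nt], x ∈ pvNT grammar := by
        intro x hx
        rcases List.mem_append.mp hx with h | h
        · exact hsub x h
        · rw [List.mem_singleton.mp h]; exact hnt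
      have hlen : visited.length + 1 ≤ (pvNT grammar).length := by
        have := (List.subperm_of_subset hnd' (fun x hx => hsub' x hx)).length_le
        simpa using this
      have hlt' : (pvNT grammar).length - (visited ++ [nt]).length < f := by
        simp only [List.length_append, List.length_singleton]
        omega
      have hadd : PySem.Set.add visited nt = visited ++ [nt] :=
        PySem.Set.add_of_not_mem hntv
      rw [anyany_iff]
      rcases hstar.cases_head with rfl | ⟨t, hedge, hstar'⟩
      · -- m = nt; since nt ∉ visited the witness is a cycle through nt
        rcases hm with hm | hm
        · exact absurd hm hntv
        · obtain ⟨t, hedge, hstar'⟩ := Relation.TransGen.head'_iff.mp hm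
          refine ⟨t, hedge, ?_⟩
          rw [hadd]
          exact ih (visited ++ [nt]) t nt hnd' hsub' (pvEdge_mem_NT hedge) hlt' hstar'
            (Or.inl (by simp))
      · refine ⟨t, hedge, ?_⟩
        rw [hadd]
        refine ih (visited ++ [nt]) t m hnd' hsub' (pvEdge_mem_NT hedge) hlt' hstar' ?_
        rcases hm with hm | hm
        · exact Or.inl (by simp [hm])
        · exact Or.inr hm

lemma pvIsRec_iff (grammar : List (String × List (List String))) (nt : String)
    (hnt : nt ∈ pvNT grammar) :
    pvIsRec grammar (pvNT grammar) ((pvNT grammar).length + 1) nt PySem.Set.empty = true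
      ↔ ∃ m, Relation.ReflTransGen (pvEdge grammar) nt m ∧
          Relation.TransGen (pvEdge grammar) m m := by
  constructor
  · intro h
    obtain ⟨m, hstar, hm⟩ := pvIsRec_sound grammar _ nt PySem.Set.empty h
    rcases hm with hm | hm
    · simp [PySem.Set.empty] at hm
    · exact ⟨m, hstar, hm⟩
  · rintro ⟨m, hstar, hm⟩
    exact pvIsRec_complete grammar _ PySem.Set.empty nt m (by simp [PySem.Set.empty])
      (by simp [PySem.Set.empty]) hnt (by simp [PySem.Set.empty]) hstar (Or.inr hm)

-- B-side characterisation ---------------------------------------------------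

lemma pvSuccD_getD (grammar : List (String × List (List String))) (k : String) :
    (pvSuccD grammar).getD k [] =
      if k ∈ (PySem.Dict.mk grammar).keys then pvSuccs grammar k else [] := by
  rw [show pvSuccD grammar = (PySem.Dict.mk grammar).keys.foldl
      (fun d nt => d.insert nt (pvSuccs grammar nt)) PySem.Dict.empty from rfl]
  rw [getD_foldl_insert_fun (pvSuccs grammar)]
  simp

lemma pvReachD_getD (grammar : List (String × List (List String))) (k : String)
    (hk : k ∈ (PySem.Dict.mk grammar).keys) :
    (pvReachD grammar).getD k [] = pvReachPlus grammar k := by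
  rw [show pvReachD grammar = (PySem.Dict.mk grammar).keys.foldl
      (fun d nt => d.insert nt (pvReachPlus grammar nt)) PySem.Dict.empty from rfl]
  rw [getD_foldl_insert_fun (pvReachPlus grammar)]
  rw [if_pos hk]

lemma pvSuccD_size (grammar : List (String × List (List String))) :
    (pvSuccD grammar).size = (pvNT grammar).length := by
  have hkeys : (pvSuccD grammar).keys = pvNT grammar := by
    rw [show pvSuccD grammar = (PySem.Dict.mk grammar).keys.foldl
        (fun d nt => d.insert nt (pvSuccs grammar nt)) PySem.Dict.empty from rfl]
    rw [PySem.Dict.keys_foldl_insert]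
    simp [PySem.Set.update_nil_left, pvNT, PySem.Dict.keys_empty]
  have : (pvSuccD grammar).size = (pvSuccD grammar).keys.length := by
    simp [PySem.Dict.size, PySem.Dict.keys]
  rw [this, hkeys]

-- step / iterate basics

-- the break-free round iteration; pvIterBreak only stops early at a fixpoint,
-- so both compute the same set (pvIterBreak_eq below)
def pvIterStep (succ : PySem.Dict String (List String)) : Nat → PySem.Set String → PySem.Set String
  | 0, r => r
  | k+1, r => pvIterStep succ k (pvStep succ r)

lemma mem_pvStep {succ : PySem.Dict String (List String)} {r : PySem.Set String} {y : String} :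
    y ∈ pvStep succ r ↔ y ∈ r ∨ ∃ m ∈ r, y ∈ succ.getD m [] := by
  simp [pvStep, PySem.Set.mem_union, PySem.Set.mem_ofList, List.mem_flatMap]

lemma subset_pvStep (succ : PySem.Dict String (List String)) (r : PySem.Set String) :
    ∀ y ∈ r, y ∈ pvStep succ r := fun _ hy => mem_pvStep.mpr (Or.inl hy)

lemma pvIterStep_inv (succ : PySem.Dict String (List String)) (P : PySem.Set String → Prop)
    (hstep : ∀ r, P r → P (pvStep succ r)) :
    ∀ (k : Nat) (r : PySem.Set String), P r → P (pvIterStep succ k r) := by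
  intro k
  induction k with
  | zero => intro r h; exact h
  | succ k ih => intro r h; exact ih _ (hstep r h)

lemma subset_pvIterStep (succ : PySem.Dict String (List String)) :
    ∀ (k : Nat) (r : PySem.Set String) (y : String), y ∈ r → y ∈ pvIterStep succ k r := by
  intro k
  induction k with
  | zero => intro r y hy; exact hy
  | succ k ih => intro r y hy; exact ih _ y (subset_pvStep succ r y hy)

lemma pvIterStep_add (succ : PySem.Dict String (List String)) :
    ∀ (a b : Nat) (r : PySem.Set String),
      pvIterStep succ (a + b) r = pvIterStep succ b (pvIterStep succ a r) := by
  intro a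
  induction a with
  | zero => intro b r; simp [pvIterStep]
  | succ a ih =>
    intro b r
    have : a + 1 + b = (a + b) + 1 := by omega
    rw [this]
    show pvIterStep succ (a + b) (pvStep succ r) = _
    rw [ih b (pvStep succ r)]
    rfl

lemma pvStep_eq_append (succ : PySem.Dict String (List String)) (r : PySem.Set String) :
    pvStep succ r = r ++ (PySem.Set.ofList
      (PySem.Set.ofList (r.flatMap (fun m => succ.getD m [])))).filter
        (fun y => !(PySem.Set.contains r y)) := by
  rw [show pvStep succ r = PySem.Set.update r
      (PySem.Set.ofList (r.flatMap (fun m => succ.getD m []))) from rfl]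
  exact PySem.Set.update_eq_append_filter _ _

lemma pvStep_fix_or_grow (succ : PySem.Dict String (List String)) (r : PySem.Set String) :
    pvStep succ r = r ∨ r.length + 1 ≤ (pvStep succ r).length := by
  rcases List.eq_nil_or_concat ((PySem.Set.ofList
      (PySem.Set.ofList (r.flatMap (fun m => succ.getD m [])))).filter
        (fun y => !(PySem.Set.contains r y))) with h | ⟨l, x, h⟩
  · left; rw [pvStep_eq_append, h, List.append_nil]
  · right
    rw [pvStep_eq_append, h]
    have : (r ++ l.concat x).length = r.length + l.length + 1 := by simp; omega
    omega

lemma pvIterStep_of_fix (succ : PySem.Dict String (List String)) (r : PySem.Set String)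
    (h : pvStep succ r = r) : ∀ k, pvIterStep succ k r = r := by
  intro k
  induction k with
  | zero => rfl
  | succ k ih => show pvIterStep succ k (pvStep succ r) = r; rw [h]; exact ih

lemma pvStep_len_eq_iff (succ : PySem.Dict String (List String)) (r : PySem.Set String) :
    ((pvStep succ r).length == r.length) = true ↔ pvStep succ r = r := by
  constructor
  · intro h
    simp only [beq_iff_eq] at h
    rcases pvStep_fix_or_grow succ r with hfx | hgt
    · exact hfx
    · omega
  · intro h; simp [h]

lemma pvIterBreak_eq (succ : PySem.Dict String (List String)) :
    ∀ (k : Nat) (r : PySem.Set String), pvIterBreak succ k r = pvIterStep succ k r := by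
  intro k
  induction k with
  | zero => intro r; rfl
  | succ k ih =>
    intro r
    show (if (pvStep succ r).length == r.length then r
      else pvIterBreak succ k (pvStep succ r)) = pvIterStep succ k (pvStep succ r)
    by_cases h : ((pvStep succ r).length == r.length) = true
    · rw [if_pos h]
      have hfx := (pvStep_len_eq_iff succ r).mp h
      rw [hfx]
      exact (pvIterStep_of_fix succ r hfx k).symm
    · rw [if_neg h]
      exact ih (pvStep succ r)

-- invariant: the working set stays a Nodup subset of the non-terminals
def pvInv (grammar : List (String × List (List String))) (r : PySem.Set String) : Prop :=
  r.Nodup ∧ ∀ y ∈ r, y ∈ pvNT grammar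

lemma pvStep_inv (grammar : List (String × List (List String))) (r : PySem.Set String)
    (h : pvInv grammar r) : pvInv grammar (pvStep (pvSuccD grammar) r) := by
  obtain ⟨hnd, hsub⟩ := h
  constructor
  · exact PySem.Set.nodup_union _ _ hnd
  · intro y hy
    rcases mem_pvStep.mp hy with hy | ⟨m, hm, hy⟩
    · exact hsub y hy
    · rw [pvSuccD_getD] at hy
      split_ifs at hy with hmk
      · exact pvEdge_mem_NT (hy : pvEdge grammar m y)
      · simp at hy

lemma pvIterStep_fixpoint (grammar : List (String × List (List String)))
    (r0 : PySem.Set String) (h0 : pvInv grammar r0) :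
    pvStep (pvSuccD grammar) (pvIterStep (pvSuccD grammar) (pvNT grammar).length r0)
      = pvIterStep (pvSuccD grammar) (pvNT grammar).length r0 := by
  set succ := pvSuccD grammar with hsucc
  set n := (pvNT grammar).length with hn
  by_cases hfix : ∃ k, k ≤ n ∧ pvStep succ (pvIterStep succ k r0) = pvIterStep succ k r0
  · obtain ⟨k, hk, hfx⟩ := hfix
    have : pvIterStep succ n r0 = pvIterStep succ k r0 := by
      have : n = k + (n - k) := by omega
      rw [this, pvIterStep_add]
      exact pvIterStep_of_fix succ _ hfx (n - k)
    rw [this, hfx]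
  · push_neg at hfix
    exfalso
    have hgrow : ∀ k, k ≤ n + 1 → k ≤ (pvIterStep succ k r0).length := by
      intro k
      induction k with
      | zero => intro _; omega
      | succ k ih =>
        intro hk
        have h1 := ih (by omega)
        have h2 : pvIterStep succ (k + 1) r0 = pvStep succ (pvIterStep succ k r0) := by
          rw [pvIterStep_add succ k 1]
          rfl
        rcases pvStep_fix_or_grow succ (pvIterStep succ k r0) with h | h
        · exact absurd h (hfix k (by omega))
        · rw [h2]; omega
    have hinvn : pvInv grammar (pvIterStep succ (n + 1) r0) :=
      pvIterStep_inv succ (pvInv grammar) (pvStep_inv grammar) (n + 1) r0 h0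
    have hle : (pvIterStep succ (n + 1) r0).length ≤ n :=
      (List.subperm_of_subset hinvn.1 (fun x hx => hinvn.2 x hx)).length_le
    have := hgrow (n + 1) (by omega)
    omega

lemma mem_pvReachPlus_iff (grammar : List (String × List (List String))) (x : String)
    (hx : x ∈ (PySem.Dict.mk grammar).keys) (y : String) :
    y ∈ pvReachPlus grammar x ↔ Relation.TransGen (pvEdge grammar) x y := by
  have hr0 : PySem.Set.ofList ((pvSuccD grammar).getD x []) = PySem.Set.ofList (pvSuccs grammar x) := by
    rw [pvSuccD_getD, if_pos hx]
  have h0inv : pvInv grammar (PySem.Set.ofList ((pvSuccD grammar).getD x [])) := by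
    rw [hr0]
    exact ⟨PySem.Set.nodup_ofList _, fun y hy => pvEdge_mem_NT ((PySem.Set.mem_ofList _ _).mp hy)⟩
  constructor
  · -- soundness: everything collected is plus-reachable
    intro hy
    have key : ∀ (k : Nat) (r : PySem.Set String),
        (pvInv grammar r ∧ ∀ z ∈ r, Relation.TransGen (pvEdge grammar) x z) →
        (pvInv grammar (pvIterStep (pvSuccD grammar) k r) ∧
          ∀ z ∈ pvIterStep (pvSuccD grammar) k r, Relation.TransGen (pvEdge grammar) x z) := by
      refine pvIterStep_inv (pvSuccD grammar) _ ?_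
      rintro r ⟨hinv, hreach⟩
      refine ⟨pvStep_inv grammar r hinv, ?_⟩
      intro z hz
      rcases mem_pvStep.mp hz with hz | ⟨m, hm, hz⟩
      · exact hreach z hz
      · rw [pvSuccD_getD] at hz
        split_ifs at hz with hmk
        · exact (hreach m hm).tail (hz : pvEdge grammar m z)
        · simp at hz
    have h0 : ∀ z ∈ PySem.Set.ofList ((pvSuccD grammar).getD x []),
        Relation.TransGen (pvEdge grammar) x z := by
      intro z hz
      rw [hr0] at hz
      exact Relation.TransGen.single ((PySem.Set.mem_ofList _ _).mp hz)
    rw [pvReachPlus, pvIterBreak_eq, pvSuccD_size] at hy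
    exact (key (pvNT grammar).length _ ⟨h0inv, h0⟩).2 y hy
  · -- completeness: the iterate is a fixpoint, hence closed under edges
    intro hy
    obtain ⟨t, hedge, hstar⟩ := Relation.TransGen.head'_iff.mp hy
    have hfix := pvIterStep_fixpoint grammar _ h0inv
    set R := pvIterStep (pvSuccD grammar) (pvNT grammar).length
      (PySem.Set.ofList ((pvSuccD grammar).getD x [])) with hR
    have hRinv : pvInv grammar R :=
      pvIterStep_inv _ (pvInv grammar) (pvStep_inv grammar) _ _ h0inv
    have hclosed : ∀ z ∈ R, ∀ w, pvEdge grammar z w → w ∈ R := by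
      intro z hz w hw
      rw [← hfix]
      refine mem_pvStep.mpr (Or.inr ⟨z, hz, ?_⟩)
      rw [pvSuccD_getD, if_pos]
      · exact hw
      · have := hRinv.2 z hz
        simpa [pvNT, PySem.Set.mem_ofList] using this
    have ht : t ∈ R := by
      apply subset_pvIterStep
      rw [hr0]
      exact (PySem.Set.mem_ofList _ _).mpr hedge
    have : ∀ z, Relation.ReflTransGen (pvEdge grammar) t z → z ∈ R := by
      intro z hz
      induction hz with
      | refl => exact ht
      | tail _ he ih => exact hclosed _ ih _ he
    have hmem := this y hstar
    rw [pvReachPlus, pvIterBreak_eq, pvSuccD_size]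
    exact hmem

lemma mem_pvCyclic_iff (grammar : List (String × List (List String))) (m : String) :
    m ∈ pvCyclic grammar ↔ m ∈ (PySem.Dict.mk grammar).keys ∧
      Relation.TransGen (pvEdge grammar) m m := by
  rw [pvCyclic, mem_foldl_add_if]
  simp only [PySem.Set.empty, List.not_mem_nil, false_or]
  constructor
  · rintro ⟨hm, hc⟩
    rw [pvReachD_getD grammar m hm] at hc
    exact ⟨hm, (mem_pvReachPlus_iff grammar m hm m).mp ((PySem.Set.contains_iff _ _).mp hc)⟩
  · rintro ⟨hm, hc⟩
    refine ⟨hm, ?_⟩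
    rw [pvReachD_getD grammar m hm]
    exact (PySem.Set.contains_iff _ _).mpr ((mem_pvReachPlus_iff grammar m hm m).mpr hc)

lemma predB_iff (grammar : List (String × List (List String))) (nt : String)
    (hnt : nt ∈ (PySem.Dict.mk grammar).keys) :
    ((pvCyclic grammar).any (fun m => m == nt ||
        PySem.Set.contains ((pvReachD grammar).getD nt []) m) = true)
      ↔ ∃ m, Relation.ReflTransGen (pvEdge grammar) nt m ∧
          Relation.TransGen (pvEdge grammar) m m := by
  rw [pvReachD_getD grammar nt hnt]
  simp only [List.any_eq_true, Bool.or_eq_true, beq_iff_eq]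
  constructor
  · rintro ⟨m, hm, hnt' | hr⟩
    · obtain ⟨_, hcyc⟩ := (mem_pvCyclic_iff grammar m).mp hm
      subst hnt'
      exact ⟨m, Relation.ReflTransGen.refl, hcyc⟩
    · obtain ⟨_, hcyc⟩ := (mem_pvCyclic_iff grammar m).mp hm
      exact ⟨m, ((mem_pvReachPlus_iff grammar nt hnt m).mp
        ((PySem.Set.contains_iff _ _).mp hr)).to_reflTransGen, hcyc⟩
  · rintro ⟨m, hstar, hcyc⟩
    have hmk : m ∈ (PySem.Dict.mk grammar).keys := by
      obtain ⟨c, _, hedge⟩ := Relation.TransGen.tail'_iff.mp hcyc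
      have := pvEdge_mem_NT hedge
      simpa [pvNT, PySem.Set.mem_ofList] using this
    refine ⟨m, (mem_pvCyclic_iff grammar m).mpr ⟨hmk, hcyc⟩, ?_⟩
    rcases (Relation.reflTransGen_iff_eq_or_transGen.mp hstar) with h | h
    · exact Or.inl h
    · exact Or.inr ((PySem.Set.contains_iff _ _).mpr ((mem_pvReachPlus_iff grammar nt hnt m).mpr h))

-- pointwise agreement of the two membership predicates on the non-terminals
lemma pred_eq (grammar : List (String × List (List String))) (nt : String)
    (hnt : nt ∈ pvNT grammar) :
    pvIsRec grammar (pvNT grammar) ((pvNT grammar).length + 1) nt PySem.Set.empty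
      = (pvCyclic grammar).any (fun m => m == nt ||
          PySem.Set.contains ((pvReachD grammar).getD nt []) m) := by
  have hk : nt ∈ (PySem.Dict.mk grammar).keys := by
    simpa [pvNT, PySem.Set.mem_ofList] using hnt
  rw [Bool.eq_iff_iff, pvIsRec_iff grammar nt hnt, predB_iff grammar nt hk]

-- ===== VERDICT (by name: the statement is the Claim_ definition above) =====
theorem find_recursive_and_non_recursive_terminals_spec : Claim_equal_find_recursive_and_non_recursive_terminals := by
  intro grammar _
  unfold Spec_find_recursive_and_non_recursive_terminals
  unfold find_recursive_and_non_recursive_terminals find_recursive_and_non_recursive_terminals_alt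
  have hnd : (pvNT grammar).Nodup := PySem.Set.nodup_ofList _
  have hA := foldl_pair_eq_filter
      (fun nt => pvIsRec grammar (pvNT grammar) ((pvNT grammar).length + 1) nt PySem.Set.empty)
      (pvNT grammar) PySem.Set.empty PySem.Set.empty hnd (by simp [PySem.Set.empty]) (by simp [PySem.Set.empty])
  have hB := foldl_add_if_eq_filter_aux
      (fun nt => (pvCyclic grammar).any (fun m => m == nt ||
        PySem.Set.contains ((pvReachD grammar).getD nt []) m))
      (pvNT grammar) PySem.Set.empty hnd (by simp [PySem.Set.empty])
  beta_reduce at hA hB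
  simp only [hA, hB]
  simp only [PySem.Set.empty, List.nil_append]
  have hfilters : (pvNT grammar).filter (fun nt =>
      pvIsRec grammar (pvNT grammar) ((pvNT grammar).length + 1) nt PySem.Set.empty)
    = (pvNT grammar).filter (fun nt => (pvCyclic grammar).any (fun m => m == nt ||
        PySem.Set.contains ((pvReachD grammar).getD nt []) m)) :=
    List.filter_congr (fun nt hnt => pred_eq grammar nt hnt)
  rw [Prod.mk.injEq]
  constructor
  · exact hfilters
  · -- non-recursive side
    rw [show PySem.Set.union (PySem.Set.diff (pvNT grammar)
        ((pvNT grammar).filter (fun nt => (pvCyclic grammar).any (fun m => m == nt ||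
          PySem.Set.contains ((pvReachD grammar).getD nt []) m))))
        (pvTerminalsB grammar)
      = PySem.Set.update ((pvNT grammar).filter (fun x => !(PySem.Set.contains
          ((pvNT grammar).filter (fun nt => (pvCyclic grammar).any (fun m => m == nt ||
            PySem.Set.contains ((pvReachD grammar).getD nt []) m))) x)))
          (pvTerminalsB grammar) from rfl]
    rw [show pvGetTerminals grammar = pvTerminalsB grammar from rfl]
    congr 1
    rw [← hfilters]
    apply List.filter_congr
    intro x hx
    have : (PySem.Set.contains ((pvNT grammar).filter (fun nt =>
        pvIsRec grammar (pvNT grammar) ((pvNT grammar).length + 1) nt PySem.Set.empty)) x)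
        = pvIsRec grammar (pvNT grammar) ((pvNT grammar).length + 1) x PySem.Set.empty := by
      rw [Bool.eq_iff_iff, PySem.Set.contains_iff, List.mem_filter]
      constructor
      · rintro ⟨_, h⟩; exact h
      · intro h; exact ⟨hx, h⟩
    rw [this]
    rfl
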